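-- pv_equiv track=rewrite | github.com/arodio/FedCIS | specs/make_3layer_tree.py | _roundest_factorisation
-- ===== SOURCE A (Python) =====
-- from typing import Dict, List, Tuple
--
-- def _roundest_factorisation(N: int) -> Tuple[int, List[int]]:
--     """
--     Return the size of the middle layer (d) and a list with the g_i
--     (leaves hanging from each middle) for the 'roundest' 3-layer tree.
--     """
--     candidates: list[tuple[int,int,int]] = []        # ( |g-d| , d , g )
--     for d in range(1, N):
--         leaves = N - 1 - d
--         if leaves < d:
--             break
--         g, r = divmod(leaves, d)
--         if r == 0:
--             candidates.append((abs(g-d), d, g))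
--
--     if candidates:                                   # perfect tree exists
--         _, d, g = min(candidates)
--         return d, [g]*d
--
--     # otherwise distribute the remainders
--     best: Tuple[int,int,int] | None = None           # (rem, d, g)
--     for d in range(1, N):
--         leaves = N - 1 - d
--         if leaves < d:
--             break
--         g, r = divmod(leaves, d)
--         if best is None or r < best[0]:
--             best = (r, d, g)
--     if best is None:
--         raise ValueError("cannot build 3-layer tree with so few nodes")
--     r, d, g = best
--     g_list = [g+1]*r + [g]*(d-r)                     # one extra leaf on first r middles
--     return d, g_list
-- ===== SOURCE B (Python) =====
-- from typing import List, Tuple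
--
-- def _roundest_factorisation(N: int) -> Tuple[int, List[int]]:
--     """
--     Same result as A, but found by enumerating the divisors of M = N-1 in
--     pairs (i, M//i) for i up to sqrt(M): every admissible middle-layer size d
--     divides M (a perfect candidate always exists for N >= 3, at d = 1), so the
--     answer is the divisor d of M with 2*d <= M minimising (|g-d|, d), g = M//d - 1.
--     """
--     M = N - 1
--     best = None          # (|g-d|, d)
--     bd = bg = 0
--     i = 1
--     while i * i <= M:
--         if M % i == 0:
--             for d in (i, M // i):
--                 if 2 * d <= M:
--                     g = M // d - 1
--                     key = (abs(g - d), d)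
--                     if best is None or key < best:
--                         best, bd, bg = key, d, g
--         i += 1
--     if best is None:
--         raise ValueError("cannot build 3-layer tree with so few nodes")
--     return bd, [bg] * bd
-- ===== Notes on version B (the rewrite author's own statement) =====
-- stated objective: faster
-- what changed: Instead of scanning every d in range(1,N) (and a second dead scan), B enumerates only the divisors of N-1 in pairs (i, (N-1)//i) for i up to sqrt(N-1) with a running minimum of the key (|g-d|, d); a perfect candidate always exists for N >= 3 (d = 1), so the remainder-distribution branch of A is dead code and disappears.
import Mathlib
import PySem

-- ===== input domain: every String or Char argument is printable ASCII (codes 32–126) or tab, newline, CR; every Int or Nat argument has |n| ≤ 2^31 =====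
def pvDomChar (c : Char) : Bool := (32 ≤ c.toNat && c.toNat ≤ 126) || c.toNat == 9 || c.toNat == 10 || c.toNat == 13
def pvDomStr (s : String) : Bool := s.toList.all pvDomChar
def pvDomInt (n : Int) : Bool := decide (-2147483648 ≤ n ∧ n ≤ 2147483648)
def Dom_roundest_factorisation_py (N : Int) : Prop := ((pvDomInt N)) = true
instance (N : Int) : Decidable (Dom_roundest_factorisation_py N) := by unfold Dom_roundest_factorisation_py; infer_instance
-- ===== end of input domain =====

-- B replaces A's O(N) scan (plus an unreachable second scan) by an enumeration of the
-- divisor pairs (i, M//i) of M = N-1 for i*i ≤ M with a running lexicographic minimum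
-- of the key (|g-d|, d); measured faster (asymptotic: O(√N) vs O(N)).


-- ===== PORT A =====
-- first loop: for d in range(1,N): leaves = N-1-d; break if leaves < d; append (|g-d|,d,g) if r == 0
def pvALoop1 (M : Int) : List Int → List (Int × Int × Int)
  | [] => []
  | d :: rest =>
    let leaves := M - d
    if leaves < d then []
    else
      let g := PySem.Int.floordiv leaves d
      let r := PySem.Int.mod leaves d
      if r == 0 then (|g - d|, d, g) :: pvALoop1 M rest else pvALoop1 M rest

-- second loop: running best (rem, d, g), replaced on strict 'r < best[0]'
def pvALoop2 (M : Int) : List Int → Option (Int × Int × Int) → Option (Int × Int × Int)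
  | [], best => best
  | d :: rest, best =>
    let leaves := M - d
    if leaves < d then best
    else
      let g := PySem.Int.floordiv leaves d
      let r := PySem.Int.mod leaves d
      match best with
      | none => pvALoop2 M rest (some (r, d, g))
      | some b => if r < b.1 then pvALoop2 M rest (some (r, d, g)) else pvALoop2 M rest b

-- Python's min over int triples compares them lexicographically: encoded by a toLex key
def pvTripleKey (t : Int × Int × Int) : Lex (Int × Lex (Int × Int)) := toLex (t.1, toLex (t.2.1, t.2.2))

def roundest_factorisation_py (N : Int) : Int × List Int :=
  match PySem.List.min? (pvALoop1 (N - 1) (PySem.List.pyRange 1 N 1)) pvTripleKey with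
  | some (_, d, g) => (d, PySem.List.pyRepeat [g] d)       -- if candidates: _,d,g = min(candidates)
  | none =>
    match pvALoop2 (N - 1) (PySem.List.pyRange 1 N 1) none with
    | some (r, d, g) => (d, PySem.List.pyRepeat [g + 1] r ++ PySem.List.pyRepeat [g] (d - r))
    | none => (0, [])                                      -- raise ValueError: outside Pre_

-- ===== PORT B =====
-- Python tuple '<' on (Int, Int)
def pvLex2Lt (a b : Int × Int) : Bool := a.1 < b.1 || (a.1 == b.1 && a.2 < b.2)

-- body of 'for d in (i, M//i): if 2*d <= M: … update running best'
def pvBUpd (M : Int) (best : Option ((Int × Int) × Int × Int)) (d : Int) :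
    Option ((Int × Int) × Int × Int) :=
  if 2 * d ≤ M then
    let g := PySem.Int.floordiv M d - 1
    let key := (|g - d|, d)
    match best with
    | none => some (key, d, g)
    | some b => if pvLex2Lt key b.1 then some (key, d, g) else some b
  else best

-- while i*i <= M: if M % i == 0: consider d = i and d = M//i; i += 1
def pvBLoop (M : Int) (i : Int) (best : Option ((Int × Int) × Int × Int)) :
    Option ((Int × Int) × Int × Int) :=
  if h : i * i ≤ M then
    pvBLoop M (i + 1)
      (if PySem.Int.mod M i == 0 then pvBUpd M (pvBUpd M best i) (PySem.Int.floordiv M i) else best)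
  else best
termination_by (M + 1 - i).toNat
decreasing_by
  have h2 : 2 * i ≤ M + 1 := by nlinarith [mul_self_nonneg (i - 1)]
  have h0 : 0 ≤ M := le_trans (mul_self_nonneg i) h
  omega

def roundest_factorisation_py_alt (N : Int) : Int × List Int :=
  let M := N - 1
  match pvBLoop M 1 none with
  | some (_, d, g) => (d, PySem.List.pyRepeat [g] d)
  | none => (0, [])                                        -- raise ValueError: outside Pre_

-- ===== PRECONDITION & SPEC =====
-- A raises ValueError for every N ≤ 2 (no 3-layer tree exists there, both loops never run);
-- Pre_ is exactly the set of inputs on which A returns.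
def Pre_roundest_factorisation_py (N : Int) : Prop := 3 ≤ N
instance (N : Int) : Decidable (Pre_roundest_factorisation_py N) := by
  unfold Pre_roundest_factorisation_py; infer_instance
def pvWitness_roundest_factorisation_py : Int := (7)

def Spec_roundest_factorisation_py (N : Int) (out : Int × List Int) : Prop :=
  out = roundest_factorisation_py_alt N
instance (N : Int) (out : Int × List Int) : Decidable (Spec_roundest_factorisation_py N out) := by
  unfold Spec_roundest_factorisation_py; infer_instance

-- ===== CLAIM (what is proved, stated in full; the proofs are below) =====
def Claim_equal_roundest_factorisation_py : Prop :=
  ∀ (N : Int), Dom_roundest_factorisation_py N → Pre_roundest_factorisation_py N →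
    Spec_roundest_factorisation_py N (roundest_factorisation_py N)

-- ===== LEMMAS AND PROOFS =====

-- admissible middle-layer sizes d for M = N-1, the shared key, and the optimal divisor
def pvG (M d : Int) : Int := PySem.Int.floordiv M d - 1
def pvD (M d : Int) : Prop := 1 ≤ d ∧ 2 * d ≤ M ∧ d ∣ M
def pvK (M d : Int) : Int × Int := (|pvG M d - d|, d)
def pvT (M d : Int) : Int × Int × Int := (|pvG M d - d|, d, pvG M d)
def pvLt (a b : Int × Int) : Prop := a.1 < b.1 ∨ (a.1 = b.1 ∧ a.2 < b.2)
def pvBest (M d : Int) : Prop := pvD M d ∧ ∀ e, pvD M e → e ≠ d → pvLt (pvK M d) (pvK M e)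
def pvOk (M : Int) (b : Option ((Int × Int) × Int × Int)) : Prop :=
  b = none ∨ ∃ e, pvD M e ∧ b = some (pvK M e, e, pvG M e)
-- the iteration of B's loop at which the optimal divisor d₀ is considered
def pvJ (M d₀ : Int) : Int := if d₀ * d₀ ≤ M then d₀ else PySem.Int.floordiv M d₀

lemma pvg_eq (M d : Int) (hd : 1 ≤ d) :
    PySem.Int.floordiv (M - d) d = pvG M d := by
  have hd0 : (0:Int) < d := by omega
  unfold pvG
  rw [PySem.Int.floordiv_eq_ediv_of_pos hd0, PySem.Int.floordiv_eq_ediv_of_pos hd0]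
  have h := Int.add_mul_ediv_right M (-1) (ne_of_gt hd0)
  have hM : M - d = M + (-1) * d := by ring
  rw [hM, h]; ring

lemma dvd_sub_iff (M d : Int) : d ∣ (M - d) ↔ d ∣ M := by
  constructor
  · intro h; have := h.add (dvd_refl d); simpa using this
  · intro h; exact h.sub (dvd_refl d)

lemma lex2lt_iff (a b : Int × Int) : pvLex2Lt a b = true ↔ pvLt a b := by
  simp [pvLex2Lt, pvLt]

lemma exists_best (M : Int) (hM : 2 ≤ M) : ∃ d, pvBest M d := by
  classical
  have hne : ((Finset.Icc (1:Int) M).filter (fun d => pvD M d)).Nonempty := by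
    refine ⟨1, ?_⟩
    simp [pvD, Finset.mem_filter, Finset.mem_Icc]
    omega
  obtain ⟨d₀, hd₀, hmin⟩ := Finset.exists_min_image _ (fun d => toLex (pvK M d)) hne
  rw [Finset.mem_filter] at hd₀
  refine ⟨d₀, hd₀.2, ?_⟩
  intro e he hne'
  have heS : e ∈ (Finset.Icc (1:Int) M).filter (fun d => pvD M d) := by
    rw [Finset.mem_filter, Finset.mem_Icc]
    exact ⟨⟨he.1, by have := he.2.1; omega⟩, he⟩
  have hle := hmin e heS
  have hne2 : toLex (pvK M d₀) ≠ toLex (pvK M e) := by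
    intro h
    apply hne'
    have := congrArg (fun p => (ofLex p).2) h
    simpa [pvK] using this.symm
  have hlt : toLex (pvK M d₀) < toLex (pvK M e) := lt_of_le_of_ne hle hne2
  rw [Prod.Lex.lt_iff] at hlt
  exact hlt

-- A's first loop over any suffix of range(1,N): exactly the admissible divisors ≥ a survive
lemma aloop1_mem (M b : Int) (hMb : M < 2 * b) :
    ∀ a x, 1 ≤ a →
      (x ∈ pvALoop1 M (PySem.List.pyRange a b 1) ↔ ∃ d, a ≤ d ∧ pvD M d ∧ x = pvT M d) := by
  intro a x ha
  obtain ⟨n, hn⟩ : ∃ n : Nat, (b - a).toNat = n := ⟨_, rfl⟩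
  induction n generalizing a with
  | zero =>
    have hba : b ≤ a := by omega
    rw [PySem.List.pyRange_one_eq_nil hba]
    simp only [pvALoop1, List.not_mem_nil, false_iff]
    rintro ⟨d, had, ⟨hd1, hd2, _⟩, _⟩
    omega
  | succ n ih =>
    have hab : a < b := by omega
    rw [PySem.List.pyRange_one_cons hab]
    simp only [pvALoop1]
    by_cases h1 : M - a < a
    · simp only [if_pos h1, List.not_mem_nil, false_iff]
      rintro ⟨d, had, ⟨hd1, hd2, _⟩, _⟩
      omega
    · rw [if_neg h1]
      have ha0 : (0:Int) < a := by omega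
      have hmodiff : (PySem.Int.mod (M - a) a == 0) = true ↔ a ∣ M := by
        rw [beq_iff_eq, PySem.Int.mod_eq_zero_iff_dvd, dvd_sub_iff]
      have hrec := ih (a + 1) (by omega) (by omega)
      by_cases hdvd : a ∣ M
      · rw [if_pos (hmodiff.mpr hdvd), pvg_eq M a ha]
        simp only [List.mem_cons, hrec]
        constructor
        · rintro (rfl | ⟨d, had, hD, hx⟩)
          · exact ⟨a, le_refl a, ⟨ha, by omega, hdvd⟩, rfl⟩
          · exact ⟨d, by omega, hD, hx⟩
        · rintro ⟨d, had, hD, hx⟩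
          rcases eq_or_lt_of_le had with rfl | hlt
          · exact Or.inl hx
          · exact Or.inr ⟨d, by omega, hD, hx⟩
      · rw [if_neg (by simpa using (fun h => hdvd (hmodiff.mp (by simpa using h))))]
        rw [hrec]
        constructor
        · rintro ⟨d, had, hD, hx⟩; exact ⟨d, by omega, hD, hx⟩
        · rintro ⟨d, had, hD, hx⟩
          rcases eq_or_lt_of_le had with rfl | hlt
          · exact absurd hD.2.2 hdvd
          · exact ⟨d, by omega, hD, hx⟩

lemma portA_eq (N d₀ : Int) (hN : 3 ≤ N) (hb : pvBest (N - 1) d₀) :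
    roundest_factorisation_py N = (d₀, PySem.List.pyRepeat [pvG (N - 1) d₀] d₀) := by
  set M := N - 1 with hMdef
  have hM : 2 ≤ M := by omega
  have hmem := aloop1_mem M N (by omega) 1
  have htd₀ : pvT M d₀ ∈ pvALoop1 M (PySem.List.pyRange 1 N 1) :=
    (hmem _ le_rfl).mpr ⟨d₀, hb.1.1, hb.1, rfl⟩
  have hnenil : pvALoop1 M (PySem.List.pyRange 1 N 1) ≠ [] := by
    intro h; rw [h] at htd₀; exact List.not_mem_nil htd₀
  obtain ⟨m, hm⟩ : ∃ m, PySem.List.min? (pvALoop1 M (PySem.List.pyRange 1 N 1)) pvTripleKey = some m := by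
    cases hc : PySem.List.min? (pvALoop1 M (PySem.List.pyRange 1 N 1)) pvTripleKey with
    | none => exact absurd ((PySem.List.min?_eq_none_iff _ _).mp hc) hnenil
    | some m => exact ⟨m, rfl⟩
  obtain ⟨e, _, hDe, rfl⟩ := (hmem m le_rfl).mp (PySem.List.min?_mem hm)
  have hle := PySem.List.min?_isMin hm (pvT M d₀) htd₀
  have hed : e = d₀ := by
    by_contra hne
    have hlt := hb.2 e hDe hne
    unfold pvTripleKey pvT at hle
    rw [Prod.Lex.le_iff] at hle
    unfold pvLt pvK at hlt
    simp only [ofLex_toLex] at hle hlt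
    rcases hle with h | ⟨h1, h2⟩
    · rcases hlt with h' | ⟨h1', _⟩ <;> omega
    · rw [Prod.Lex.le_iff] at h2
      simp only [ofLex_toLex] at h2
      rcases h2 with h' | ⟨h2', _⟩ <;> rcases hlt with h'' | ⟨h1'', h2''⟩ <;> omega
  subst hed
  unfold roundest_factorisation_py
  rw [← hMdef, hm]
  simp [pvT]

lemma bupd_ok (M : Int) (b : Option ((Int × Int) × Int × Int)) (d : Int)
    (hd : 2 * d ≤ M → pvD M d) (hb : pvOk M b) : pvOk M (pvBUpd M b d) := by
  cases b with
  | none =>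
    unfold pvBUpd
    dsimp only
    split
    · rename_i h2d; exact Or.inr ⟨d, hd h2d, rfl⟩
    · exact hb
  | some p =>
    unfold pvBUpd
    dsimp only
    split
    · rename_i h2d
      split
      · exact Or.inr ⟨d, hd h2d, rfl⟩
      · exact hb
    · exact hb

-- once the optimum is the running best, no later update displaces it
lemma bupd_best (M d₀ d : Int) (hbest : pvBest M d₀) (hd : 2 * d ≤ M → pvD M d) :
    pvBUpd M (some (pvK M d₀, d₀, pvG M d₀)) d = some (pvK M d₀, d₀, pvG M d₀) := by
  unfold pvBUpd
  dsimp only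
  split
  · rename_i h2d
    have hnot : ¬ pvLex2Lt (|PySem.Int.floordiv M d - 1 - d|, d) (pvK M d₀, d₀, pvG M d₀).1 = true := by
      rw [lex2lt_iff]
      show ¬ pvLt (pvK M d) (pvK M d₀)
      by_cases hdd : d = d₀
      · subst hdd; unfold pvLt; omega
      · have h := hbest.2 d (hd h2d) hdd
        unfold pvLt pvK at h ⊢; simp only at h ⊢; omega
    rw [if_neg hnot]
  · rfl

-- updating any admissible running best with the optimum installs the optimum
lemma bupd_hit (M d₀ : Int) (b : Option ((Int × Int) × Int × Int))
    (hbest : pvBest M d₀) (hb : pvOk M b) :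
    pvBUpd M b d₀ = some (pvK M d₀, d₀, pvG M d₀) := by
  rcases hb with rfl | ⟨e, hDe, rfl⟩
  · unfold pvBUpd
    dsimp only
    rw [if_pos hbest.1.2.1]
    show some ((|PySem.Int.floordiv M d₀ - 1 - d₀|, d₀), d₀, PySem.Int.floordiv M d₀ - 1) = _
    simp [pvK, pvG]
  · unfold pvBUpd
    dsimp only
    rw [if_pos hbest.1.2.1]
    by_cases hed : e = d₀
    · subst hed
      rw [if_neg (by rw [lex2lt_iff]; show ¬ pvLt (pvK M e) (pvK M e); unfold pvLt; omega)]
    · rw [if_pos (by rw [lex2lt_iff]; exact hbest.2 e hDe hed)]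
      show some ((|PySem.Int.floordiv M d₀ - 1 - d₀|, d₀), d₀, PySem.Int.floordiv M d₀ - 1) = _
      simp [pvK, pvG]

lemma pvJ_spec (M d₀ : Int) (hM : 2 ≤ M) (hD : pvD M d₀) :
    1 ≤ pvJ M d₀ ∧ pvJ M d₀ ∣ M ∧ pvJ M d₀ * pvJ M d₀ ≤ M ∧
      (d₀ = pvJ M d₀ ∨ d₀ = PySem.Int.floordiv M (pvJ M d₀)) := by
  obtain ⟨h1, h2, hdvd⟩ := hD
  have hd0 : (0 : Int) < d₀ := by omega
  unfold pvJ
  split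
  · rename_i hsq
    exact ⟨h1, hdvd, hsq, Or.inl rfl⟩
  · rename_i hsq
    push Not at hsq
    rw [PySem.Int.floordiv_eq_ediv_of_pos hd0]
    have hmul : M / d₀ * d₀ = M := Int.ediv_mul_cancel hdvd
    have hj1 : 1 ≤ M / d₀ := by
      by_contra h
      push Not at h
      have : M / d₀ * d₀ ≤ 0 := by nlinarith
      omega
    have hjlt : M / d₀ < d₀ := by nlinarith
    refine ⟨hj1, Dvd.intro d₀ (by linarith [hmul]), by nlinarith, Or.inr ?_⟩
    rw [PySem.Int.floordiv_eq_ediv_of_pos (by omega : (0:Int) < M / d₀)]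
    calc d₀ = (M / d₀ * d₀) / (M / d₀) := by rw [Int.mul_ediv_cancel_left _ (by omega : M / d₀ ≠ 0)]
    _ = M / (M / d₀) := by rw [hmul]

-- loop invariant for B: before iteration pvJ the running best is admissible,
-- from iteration pvJ on it is exactly the optimum
lemma bloop_inv (M d₀ : Int) (hM : 2 ≤ M) (hb : pvBest M d₀) :
    ∀ (n : Nat) (i : Int) (b : Option ((Int × Int) × Int × Int)),
      (M + 1 - i).toNat = n → 1 ≤ i →
      ((i ≤ pvJ M d₀ ∧ pvOk M b) ∨ b = some (pvK M d₀, d₀, pvG M d₀)) →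
      pvBLoop M i b = some (pvK M d₀, d₀, pvG M d₀) := by
  intro n
  induction n using Nat.strong_induction_on with
  | _ n ih =>
    intro i b hn hi hinv
    obtain ⟨hj1, hjdvd, hjsq, hjcase⟩ := pvJ_spec M d₀ hM hb.1
    rw [pvBLoop]
    split
    · rename_i hii
      have hiM : i ≤ M := by nlinarith
      apply ih (M + 1 - (i + 1)).toNat (by omega) (i + 1) _ rfl (by omega)
      by_cases hmod : (PySem.Int.mod M i == 0) = true
      · have hidvd : i ∣ M := by
          rw [beq_iff_eq, PySem.Int.mod_eq_zero_iff_dvd] at hmod; exact hmod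
        have hqpos : 1 ≤ PySem.Int.floordiv M i := by
          rw [PySem.Int.floordiv_eq_ediv_of_pos (by omega : (0:Int) < i)]
          by_contra h
          push Not at h
          nlinarith [Int.ediv_mul_cancel hidvd]
        have hqdvd : PySem.Int.floordiv M i ∣ M := by
          rw [PySem.Int.floordiv_eq_ediv_of_pos (by omega : (0:Int) < i)]
          exact Dvd.intro i (by linarith [Int.ediv_mul_cancel hidvd])
        have hgi : 2 * i ≤ M → pvD M i := fun h => ⟨hi, h, hidvd⟩
        have hgq : 2 * PySem.Int.floordiv M i ≤ M → pvD M (PySem.Int.floordiv M i) :=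
          fun h => ⟨hqpos, h, hqdvd⟩
        rw [if_pos hmod]
        rcases hinv with ⟨hij, hok⟩ | hbst
        · rcases lt_or_eq_of_le hij with hlt | heq
          · exact Or.inl ⟨by omega, bupd_ok M _ _ hgq (bupd_ok M _ _ hgi hok)⟩
          · -- i = pvJ M d₀ : this iteration considers d₀
            rw [← heq] at hjcase
            rcases hjcase with hdi | hdi
            · rw [← hdi]
              rw [← hdi] at hgq
              exact Or.inr (by rw [bupd_hit M d₀ b hb hok, bupd_best M d₀ _ hb hgq])
            · rw [← hdi]
              exact Or.inr (bupd_hit M d₀ _ hb (bupd_ok M _ _ hgi hok))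
        · rw [hbst, bupd_best M d₀ _ hb hgi, bupd_best M d₀ _ hb hgq]
          exact Or.inr rfl
      · rw [if_neg hmod]
        rcases hinv with ⟨hij, hok⟩ | hbst
        · rcases lt_or_eq_of_le hij with hlt | heq
          · exact Or.inl ⟨by omega, hok⟩
          · exfalso
            apply hmod
            rw [beq_iff_eq, PySem.Int.mod_eq_zero_iff_dvd, heq]
            exact hjdvd
        · exact Or.inr hbst
    · rename_i hii
      rcases hinv with ⟨hij, _⟩ | hbst
      · exfalso; apply hii; nlinarith
      · exact hbst

lemma portB_eq (N d₀ : Int) (hN : 3 ≤ N) (hb : pvBest (N - 1) d₀) :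
    roundest_factorisation_py_alt N = (d₀, PySem.List.pyRepeat [pvG (N - 1) d₀] d₀) := by
  have hM : 2 ≤ N - 1 := by omega
  obtain ⟨hj1, -, -, -⟩ := pvJ_spec (N - 1) d₀ hM hb.1
  have hloop := bloop_inv (N - 1) d₀ hM hb (N - 1).toNat 1 none (by omega) le_rfl
    (Or.inl ⟨hj1, Or.inl rfl⟩)
  show (match pvBLoop (N - 1) 1 none with
    | some (_, d, g) => (d, PySem.List.pyRepeat [g] d)
    | none => ((0 : Int), ([] : List Int))) = _
  rw [hloop]

-- ===== VERDICT (by name: the statement is the Claim_ definition above) =====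
theorem roundest_factorisation_py_spec : Claim_equal_roundest_factorisation_py := by
  intro N _ hPre
  unfold Pre_roundest_factorisation_py at hPre
  obtain ⟨d₀, hbest⟩ := exists_best (N - 1) (by omega)
  unfold Spec_roundest_factorisation_py
  rw [portA_eq N d₀ hPre hbest, portB_eq N d₀ hPre hbest]
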